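-- pv_equiv track=rewrite | github.com/chenlingantelope/protein_metrics | utils.py | msa_to_unmapped_seq_coord
-- ===== SOURCE A (Python) =====
-- def msa_to_unmapped_seq_coord(seq, reverse=False):
--     """
--     Create a mapping from the MSA coordinate to the original sequence coordinate or vice versa
--     :param seq: str, sequence in A2M format
--     :param reverse: bool, if True, create a mapping from the original sequence coordinate to the MSA coordinate
--     """
--
--     j = -1
--     k = -1
--     mapping = {}
--     for i in range(len(seq)):
--         if seq[i].isupper():
--             j+=1
--             k+=1
--         elif seq[i] == '-':
--             j+=1
--         elif seq[i].islower():
--             k+=1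
--         if reverse:
--             mapping[k] = j
--         else:
--             mapping[j] = k
--     return mapping
-- ===== SOURCE B (Python) =====
-- def _coords(deltas):
--     # running prefix sums starting from -1: out[i] = -1 + deltas[0] + ... + deltas[i]
--     out = []
--     t = -1
--     for d in deltas:
--         t += d
--         out.append(t)
--     return out
--
--
-- def msa_to_unmapped_seq_coord(seq, reverse=False):
--     dj = [1 if c.isupper() or c == '-' else 0 for c in seq]
--     dk = [1 if c.isupper() or c.islower() else 0 for c in seq]
--     js = _coords(dj)
--     ks = _coords(dk)
--     return dict(zip(ks, js)) if reverse else dict(zip(js, ks))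
-- ===== Notes on version B (the rewrite author's own statement) =====
-- stated objective: alternative
-- what changed: Replaces A's single interleaved loop (mutating two counters and the dict together) by separate passes: classify each character into two 0/1 delta lists, prefix-sum them into per-position coordinates, then build the dict in one shot from a zip of the two coordinate lists.
import Mathlib
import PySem

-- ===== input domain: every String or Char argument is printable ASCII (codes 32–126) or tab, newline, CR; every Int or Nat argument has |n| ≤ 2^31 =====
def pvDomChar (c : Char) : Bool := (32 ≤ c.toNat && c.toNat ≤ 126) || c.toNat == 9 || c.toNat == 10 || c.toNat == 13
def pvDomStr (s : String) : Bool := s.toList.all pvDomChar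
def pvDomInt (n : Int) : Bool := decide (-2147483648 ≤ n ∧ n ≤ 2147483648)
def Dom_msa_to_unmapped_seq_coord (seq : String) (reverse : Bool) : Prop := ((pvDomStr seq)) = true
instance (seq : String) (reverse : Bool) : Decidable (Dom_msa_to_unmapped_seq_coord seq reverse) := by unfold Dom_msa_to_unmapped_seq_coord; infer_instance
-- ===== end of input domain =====

-- B replaces A's interleaved counter-and-dict loop by classify / prefix-sum / zip-into-dict passes (alternative decomposition, same cost).

-- ===== PORT A =====
def msa_to_unmapped_seq_coord (seq : String) (reverse : Bool) : List (Int × Int) :=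
  (seq.toList.foldl
    (fun (st : Int × Int × PySem.Dict Int Int) c =>
      let jk : Int × Int :=
        if PySem.Chars.isupper c then (st.1 + 1, st.2.1 + 1)
        else if c = '-' then (st.1 + 1, st.2.1)
        else if PySem.Chars.islower c then (st.1, st.2.1 + 1)
        else (st.1, st.2.1)
      (jk.1, jk.2, if reverse then st.2.2.insert jk.2 jk.1 else st.2.2.insert jk.1 jk.2))
    (-1, -1, PySem.Dict.empty)).2.2.items

-- ===== PORT B =====
-- helper _coords: running prefix sums from -1, kept as (running total, output list)
def pvCoordsLoop (ds : List Int) : List Int :=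
  (ds.foldl (fun (st : Int × List Int) d => (st.1 + d, st.2 ++ [st.1 + d])) (-1, [])).2

def msa_to_unmapped_seq_coord_alt (seq : String) (reverse : Bool) : List (Int × Int) :=
  let cs := seq.toList
  let dj := cs.map (fun c => if PySem.Chars.isupper c || c = '-' then (1 : Int) else 0)
  let dk := cs.map (fun c => if PySem.Chars.isupper c || PySem.Chars.islower c then (1 : Int) else 0)
  let js := pvCoordsLoop dj
  let ks := pvCoordsLoop dk
  (if reverse then PySem.Dict.ofList (ks.zip js) else PySem.Dict.ofList (js.zip ks)).items

-- ===== PRECONDITION & SPEC =====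
def Spec_msa_to_unmapped_seq_coord (seq : String) (reverse : Bool) (out : List (Int × Int)) : Prop := out = msa_to_unmapped_seq_coord_alt seq reverse
instance (seq : String) (reverse : Bool) (out : List (Int × Int)) : Decidable (Spec_msa_to_unmapped_seq_coord seq reverse out) := by unfold Spec_msa_to_unmapped_seq_coord; infer_instance

-- ===== CLAIM (what is proved, stated in full; the proofs are below) =====
def Claim_equal_msa_to_unmapped_seq_coord : Prop := ∀ (seq : String) (reverse : Bool), Dom_msa_to_unmapped_seq_coord seq reverse → Spec_msa_to_unmapped_seq_coord seq reverse (msa_to_unmapped_seq_coord seq reverse)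

-- ===== LEMMAS AND PROOFS =====

-- recursive characterisation of the prefix-sum lists, used only in proofs
def pvCoR (t : Int) : List Int → List Int
  | [] => []
  | d :: ds => (t + d) :: pvCoR (t + d) ds

theorem pvCoordsLoop_general (ds : List Int) : ∀ (t : Int) (acc : List Int),
    (ds.foldl (fun (st : Int × List Int) d => (st.1 + d, st.2 ++ [st.1 + d])) (t, acc)).2
      = acc ++ pvCoR t ds := by
  induction ds with
  | nil => intro t acc; simp [pvCoR]
  | cons d ds ih =>
    intro t acc
    simp only [List.foldl_cons, pvCoR]
    rw [ih]
    simp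

theorem pvCoordsLoop_eq (ds : List Int) : pvCoordsLoop ds = pvCoR (-1) ds := by
  unfold pvCoordsLoop; rw [pvCoordsLoop_general]; simp

def pvDj (c : Char) : Int := if PySem.Chars.isupper c || c = '-' then 1 else 0
def pvDk (c : Char) : Int := if PySem.Chars.isupper c || PySem.Chars.islower c then 1 else 0

theorem pvMainLoop (reverse : Bool) : ∀ (cs : List Char) (j k : Int) (m : PySem.Dict Int Int),
    (cs.foldl
      (fun (st : Int × Int × PySem.Dict Int Int) c =>
        let jk : Int × Int :=
          if PySem.Chars.isupper c then (st.1 + 1, st.2.1 + 1)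
          else if c = '-' then (st.1 + 1, st.2.1)
          else if PySem.Chars.islower c then (st.1, st.2.1 + 1)
          else (st.1, st.2.1)
        (jk.1, jk.2, if reverse then st.2.2.insert jk.2 jk.1 else st.2.2.insert jk.1 jk.2))
      (j, k, m)).2.2
    = (if reverse then (pvCoR k (cs.map pvDk)).zip (pvCoR j (cs.map pvDj))
        else (pvCoR j (cs.map pvDj)).zip (pvCoR k (cs.map pvDk))).foldl
        (fun m (p : Int × Int) => m.insert p.1 p.2) m := by
  have hlow : PySem.Chars.islower '-' = false := by decide
  cases reverse with
  | false =>
    intro cs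
    induction cs with
    | nil => intro j k m; simp [pvCoR]
    | cons c cs ih =>
      intro j k m
      by_cases hu : PySem.Chars.isupper c = true
      · simpa [pvCoR, pvDj, pvDk, hu] using ih (j + 1) (k + 1) (m.insert (j + 1) (k + 1))
      · by_cases hd : c = '-'
        · subst hd
          simpa [pvCoR, pvDj, pvDk, hu, hlow] using ih (j + 1) k (m.insert (j + 1) k)
        · by_cases hl : PySem.Chars.islower c = true
          · simpa [pvCoR, pvDj, pvDk, hu, hd, hl] using ih j (k + 1) (m.insert j (k + 1))
          · simpa [pvCoR, pvDj, pvDk, hu, hd, hl] using ih j k (m.insert j k)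
  | true =>
    intro cs
    induction cs with
    | nil => intro j k m; simp [pvCoR]
    | cons c cs ih =>
      intro j k m
      by_cases hu : PySem.Chars.isupper c = true
      · simpa [pvCoR, pvDj, pvDk, hu] using ih (j + 1) (k + 1) (m.insert (k + 1) (j + 1))
      · by_cases hd : c = '-'
        · subst hd
          simpa [pvCoR, pvDj, pvDk, hu, hlow] using ih (j + 1) k (m.insert k (j + 1))
        · by_cases hl : PySem.Chars.islower c = true
          · simpa [pvCoR, pvDj, pvDk, hu, hd, hl] using ih j (k + 1) (m.insert (k + 1) j)
          · simpa [pvCoR, pvDj, pvDk, hu, hd, hl] using ih j k (m.insert k j)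

theorem pvOfList_eq_foldl (ps : List (Int × Int)) :
    PySem.Dict.ofList ps = ps.foldl (fun (m : PySem.Dict Int Int) (p : Int × Int) => m.insert p.1 p.2) PySem.Dict.empty := by
  rfl

-- ===== VERDICT (by name: the statement is the Claim_ definition above) =====
theorem msa_to_unmapped_seq_coord_spec : Claim_equal_msa_to_unmapped_seq_coord := by
  intro seq reverse _
  unfold Spec_msa_to_unmapped_seq_coord msa_to_unmapped_seq_coord msa_to_unmapped_seq_coord_alt
  rw [pvMainLoop]
  simp only [pvCoordsLoop_eq]
  cases reverse <;> rw [pvOfList_eq_foldl] <;> rfl
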